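-- pv_equiv track=rewrite | github.com/SmashingBumpkin/Python | exam_example-22-12-19/program.py | func4
-- ===== SOURCE A (Python) =====
-- def func4(grid, path):
--     # WRITE HERE YOUR CODE
--     moveDict = {
--         "L": (0,-1),
--         "R": (0, 1),
--         "U":(-1, 0),
--         "D": (1, 0),
--         "S": (0, 0)}
--     output = []
--     y, x = 0, 0
--     for character in path:
--         y += moveDict[character][0]
--         x += moveDict[character][1]
--         output.append(grid[y][x])
--     return output
-- ===== SOURCE B (Python) =====
-- def func4(grid, path):
--     # Closed form: the position after k+1 moves is determined directly by the
--     # letter counts of the prefix path[:k+1] -- no move table, no running state.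
--     return [grid[path[:k + 1].count("D") - path[:k + 1].count("U")]
--                 [path[:k + 1].count("R") - path[:k + 1].count("L")]
--             for k in range(len(path))]
-- ===== Notes on version B (the rewrite author's own statement) =====
-- stated objective: alternative
-- what changed: Replaces A's stateful loop that accumulates move deltas from a move table by a closed-form list comprehension: the position after k+1 moves is computed directly from the letter counts of the prefix path[:k+1] (count('D')-count('U'), count('R')-count('L')), with no move dictionary and no running state.
import Mathlib
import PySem

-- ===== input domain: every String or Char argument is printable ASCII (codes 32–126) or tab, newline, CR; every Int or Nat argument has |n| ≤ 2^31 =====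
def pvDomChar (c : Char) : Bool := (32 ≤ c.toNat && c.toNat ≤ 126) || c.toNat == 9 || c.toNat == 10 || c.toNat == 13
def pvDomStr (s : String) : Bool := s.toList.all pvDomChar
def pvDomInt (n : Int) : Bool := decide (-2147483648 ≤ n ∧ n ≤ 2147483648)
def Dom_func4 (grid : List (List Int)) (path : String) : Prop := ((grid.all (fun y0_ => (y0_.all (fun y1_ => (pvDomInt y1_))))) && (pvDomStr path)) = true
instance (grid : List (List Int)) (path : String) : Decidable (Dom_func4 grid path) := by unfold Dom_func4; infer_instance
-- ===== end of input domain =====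

-- B replaces A's stateful delta-accumulating loop by a closed form: the position after
-- k+1 moves is read off the letter counts of the prefix path[:k+1]; objective: alternative.

-- ===== PORT A =====
-- moveDict of A (iteration over a Python str yields 1-char strings = Char here)
def pvMoveDict : PySem.Dict Char (Int × Int) :=
  PySem.Dict.ofList [('L', (0, -1)), ('R', (0, 1)), ('U', (-1, 0)), ('D', (1, 0)), ('S', (0, 0))]

-- the for-loop of A, over state (y, x, output); none = the Python raised (KeyError/IndexError)
def pvALoop (grid : List (List Int)) : List Char → Int → Int → List Int → Option (List Int)
  | [], _, _, output => some output
  | c :: cs, y, x, output =>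
    match pvMoveDict.get? c with
    | none => none
    | some d =>
      let y' := y + d.1
      let x' := x + d.2
      match PySem.List.pyGet? grid y' with
      | none => none
      | some row =>
        match PySem.List.pyGet? row x' with
        | none => none
        | some v => pvALoop grid cs y' x' (output ++ [v])

def func4 (grid : List (List Int)) (path : String) : List Int :=
  (pvALoop grid path.toList 0 0 []).getD []

-- ===== PORT B =====
-- path[:k+1].count("D") - path[:k+1].count("U"): for a 1-char needle, Python str.count on a
-- prefix is exactly List.count of that char on take (k+1) of the char list (exact on Dom).
def pvPosY (cs : List Char) (k : Nat) : Int :=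
  ((cs.take (k + 1)).count 'D' : Int) - ((cs.take (k + 1)).count 'U' : Int)
def pvPosX (cs : List Char) (k : Nat) : Int :=
  ((cs.take (k + 1)).count 'R' : Int) - ((cs.take (k + 1)).count 'L' : Int)

-- grid[yk][xk]  (none = IndexError)
def pvLook (grid : List (List Int)) (cs : List Char) (k : Nat) : Option Int :=
  match PySem.List.pyGet? grid (pvPosY cs k) with
  | none => none
  | some row => PySem.List.pyGet? row (pvPosX cs k)

-- the list comprehension over range(len(path)), evaluated left to right
def pvCollect (grid : List (List Int)) (cs : List Char) : List Nat → Option (List Int)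
  | [] => some []
  | k :: ks =>
    match pvLook grid cs k with
    | none => none
    | some v => (pvCollect grid cs ks).map (v :: ·)

def func4_alt (grid : List (List Int)) (path : String) : List Int :=
  (pvCollect grid path.toList (List.range path.toList.length)).getD []

-- ===== PRECONDITION & SPEC =====
-- Pre_ excludes exactly the inputs where Python A raises: a character outside moveDict (KeyError)
-- or a visited position outside the grid's Python index range (IndexError).
def Pre_func4 (grid : List (List Int)) (path : String) : Prop :=
  (path.toList.all (fun c => ['L', 'R', 'U', 'D', 'S'].contains c) = true) ∧
  ((List.range path.toList.length).all (fun k =>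
    ((PySem.List.pyGet? grid
        (((path.toList.take (k + 1)).count 'D' : Int) - ((path.toList.take (k + 1)).count 'U' : Int))).bind
      (fun row => PySem.List.pyGet? row
        (((path.toList.take (k + 1)).count 'R' : Int) - ((path.toList.take (k + 1)).count 'L' : Int)))).isSome) = true)
instance (grid : List (List Int)) (path : String) : Decidable (Pre_func4 grid path) := by
  unfold Pre_func4; infer_instance

def pvWitness_func4 : List (List Int) × String := ([[1]], "S")

def Spec_func4 (grid : List (List Int)) (path : String) (out : List Int) : Prop := out = func4_alt grid path
instance (grid : List (List Int)) (path : String) (out : List Int) : Decidable (Spec_func4 grid path out) := by unfold Spec_func4; infer_instance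

-- ===== CLAIM (what is proved, stated in full; the proofs are below) =====
def Claim_equal_func4 : Prop := ∀ (grid : List (List Int)) (path : String), Dom_func4 grid path → Pre_func4 grid path → Spec_func4 grid path (func4 grid path)

-- ===== LEMMAS AND PROOFS =====

-- per-character displacement, phrased by counts so it composes with pvPosY/pvPosX
def pvDelY (c : Char) : Int := (([c].count 'D' : Int)) - (([c].count 'U' : Int))
def pvDelX (c : Char) : Int := (([c].count 'R' : Int)) - (([c].count 'L' : Int))

lemma pvMoveDict_valid (c : Char) (h : ['L', 'R', 'U', 'D', 'S'].contains c = true) :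
    pvMoveDict.get? c = some (pvDelY c, pvDelX c) := by
  simp only [List.contains_eq_mem, List.mem_cons, decide_eq_true_eq] at h
  rcases h with h | h | h | h | h | h <;> first | (subst h; decide) | simp at h

lemma pvPosY_zero (c : Char) (cs : List Char) : pvPosY (c :: cs) 0 = pvDelY c := by
  simp [pvPosY, pvDelY]

lemma pvPosX_zero (c : Char) (cs : List Char) : pvPosX (c :: cs) 0 = pvDelX c := by
  simp [pvPosX, pvDelX]

lemma pvPosY_succ (c : Char) (cs : List Char) (k : Nat) :
    pvPosY (c :: cs) (k + 1) = pvDelY c + pvPosY cs k := by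
  simp [pvPosY, pvDelY, List.take_succ_cons, List.count_cons]
  ring

lemma pvPosX_succ (c : Char) (cs : List Char) (k : Nat) :
    pvPosX (c :: cs) (k + 1) = pvDelX c + pvPosX cs k := by
  simp [pvPosX, pvDelX, List.take_succ_cons, List.count_cons]
  ring

-- offset version of pvCollect used to state the loop invariant
def pvC (grid : List (List Int)) (cs : List Char) (y x : Int) : List Nat → Option (List Int)
  | [] => some []
  | k :: ks =>
    match (PySem.List.pyGet? grid (y + pvPosY cs k)).bind
            (fun row => PySem.List.pyGet? row (x + pvPosX cs k)) with
    | none => none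
    | some v => (pvC grid cs y x ks).map (v :: ·)

lemma pvC_zero (grid : List (List Int)) (cs : List Char) :
    ∀ l, pvC grid cs 0 0 l = pvCollect grid cs l := by
  intro l
  induction l with
  | nil => rfl
  | cons k ks ih =>
    simp only [pvC, pvCollect, pvLook, zero_add, ih]
    cases PySem.List.pyGet? grid (pvPosY cs k) <;> simp [Option.bind]

lemma pvC_shift (grid : List (List Int)) (c : Char) (cs : List Char) (y x : Int) :
    ∀ l, pvC grid (c :: cs) y x (l.map Nat.succ) =
         pvC grid cs (y + pvDelY c) (x + pvDelX c) l := by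
  intro l
  induction l with
  | nil => rfl
  | cons k ks ih =>
    simp only [List.map_cons, pvC, Nat.succ_eq_add_one, pvPosY_succ, pvPosX_succ, ih,
      add_assoc]

lemma pvALoop_eq (grid : List (List Int)) :
    ∀ (cs : List Char) (y x : Int) (acc : List Int),
      cs.all (fun c => ['L', 'R', 'U', 'D', 'S'].contains c) = true →
      pvALoop grid cs y x acc =
        (pvC grid cs y x (List.range cs.length)).map (acc ++ ·) := by
  intro cs
  induction cs with
  | nil => intro y x acc _; simp [pvALoop, pvC, List.range_zero]
  | cons c cs ih =>
    intro y x acc hv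
    simp only [List.all_cons, Bool.and_eq_true] at hv
    obtain ⟨hc, hcs⟩ := hv
    simp only [pvALoop, pvMoveDict_valid c hc, List.length_cons, List.range_succ_eq_map,
      pvC, pvPosY_zero, pvPosX_zero]
    cases hg : PySem.List.pyGet? grid (y + pvDelY c) with
    | none => simp
    | some row =>
      simp only [Option.bind]
      cases hr : PySem.List.pyGet? row (x + pvDelX c) with
      | none => simp
      | some v =>
        simp only [pvC_shift, ih (y + pvDelY c) (x + pvDelX c) (acc ++ [v]) hcs]
        cases pvC grid cs (y + pvDelY c) (x + pvDelX c) (List.range cs.length) <;> simp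

-- ===== VERDICT (by name: the statement is the Claim_ definition above) =====
theorem func4_spec : Claim_equal_func4 := by
  intro grid path _ hpre
  unfold Spec_func4 func4 func4_alt
  rw [pvALoop_eq grid path.toList 0 0 [] hpre.1, pvC_zero]
  cases pvCollect grid path.toList (List.range path.toList.length) <;> simp
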